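-- pv_equiv track=rewrite | github.com/mldkyt/femboybot | features/leveling.py | get_xp_for_level
-- ===== SOURCE A (Python) =====
-- def get_xp_for_level(level: int):
--     current = 0
--     xp = 500
--     iter = 0
--     while current < level:
--         if iter >= 10000000:
--             raise OverflowError('Iteration limit reached.')
--         xp *= 2
--         current += 1
--         iter += 1
--
--     return xp
-- ===== SOURCE B (Python) =====
-- def get_xp_for_level(level: int):
--     if level > 10000000:
--         raise OverflowError('Iteration limit reached.')
--     if level <= 0:
--         return 500
--     return 500 << level
-- ===== Notes on version B (the rewrite author's own statement) =====
-- stated objective: faster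
-- what changed: Replaced the doubling while-loop with a closed-form left shift (500 for non-positive levels), keeping the OverflowError for oversized levels; intended as faster (a timing run measured large speedups at every size it could decode, but could not decode the largest size because the result exceeds the harness's int-to-str limit).
import Mathlib
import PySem

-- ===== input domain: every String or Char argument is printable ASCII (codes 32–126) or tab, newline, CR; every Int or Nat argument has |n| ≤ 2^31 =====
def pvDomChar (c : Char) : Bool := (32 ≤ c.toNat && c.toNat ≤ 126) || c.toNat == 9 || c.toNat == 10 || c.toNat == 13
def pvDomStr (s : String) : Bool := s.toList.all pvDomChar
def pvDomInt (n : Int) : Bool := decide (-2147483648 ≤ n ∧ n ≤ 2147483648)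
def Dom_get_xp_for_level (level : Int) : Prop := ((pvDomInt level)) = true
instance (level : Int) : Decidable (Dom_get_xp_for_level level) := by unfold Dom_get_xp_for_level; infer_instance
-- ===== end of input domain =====

-- B replaces A's doubling while-loop with the closed form 500 * 2^level (faster: O(1) shift vs O(level) multiplications).
-- Equivalence is about the return value; for level > 10^7 both Pythons raise OverflowError (excluded by Pre_).

-- ===== PORT A =====
-- A's while-loop; on the raise branch (iter ≥ 10^7, unreachable inside Pre_) the port returns xp.
def get_xp_for_level.loop (level current xp iter : Int) : Int :=
  if _h : current < level then
    if iter ≥ 10000000 then xp  -- Python: raise OverflowError (outside Pre_)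
    else get_xp_for_level.loop level (current + 1) (xp * 2) (iter + 1)
  else xp
termination_by (level - current).toNat
decreasing_by omega

def get_xp_for_level (level : Int) : Int :=
  get_xp_for_level.loop level 0 500 0

-- ===== PORT B =====
def get_xp_for_level_alt (level : Int) : Int :=
  if level > 10000000 then 0  -- Python: raise OverflowError (outside Pre_)
  else if level ≤ 0 then 500
  else 500 * 2 ^ level.toNat  -- 500 << level

-- ===== PRECONDITION & SPEC =====
-- Pre_ excludes level > 10^7, where both A and B raise OverflowError.
def Pre_get_xp_for_level (level : Int) : Prop := level ≤ 10000000
instance (level : Int) : Decidable (Pre_get_xp_for_level level) := by unfold Pre_get_xp_for_level; infer_instance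
def pvWitness_get_xp_for_level : Int := 5

def Spec_get_xp_for_level (level : Int) (out : Int) : Prop := out = get_xp_for_level_alt level
instance (level : Int) (out : Int) : Decidable (Spec_get_xp_for_level level out) := by unfold Spec_get_xp_for_level; infer_instance

-- ===== CLAIM (what is proved, stated in full; the proofs are below) =====
def Claim_equal_get_xp_for_level : Prop := ∀ (level : Int), Dom_get_xp_for_level level → Pre_get_xp_for_level level → Spec_get_xp_for_level level (get_xp_for_level level)

-- ===== LEMMAS AND PROOFS =====

-- Loop invariant: with iter = current ≤ level ≤ 10^7, the loop multiplies xp by 2^(level - current).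
theorem get_xp_for_level_loop_closed (level : Int) (hlev : level ≤ 10000000) :
    ∀ (n : Nat) (current xp : Int), 0 ≤ current → (level - current).toNat = n →
      get_xp_for_level.loop level current xp current = xp * 2 ^ n := by
  intro n
  induction n with
  | zero =>
    intro current xp hc hn
    rw [get_xp_for_level.loop]
    have : ¬ current < level := by omega
    simp [this]
  | succ k ih =>
    intro current xp hc hn
    rw [get_xp_for_level.loop]
    have h1 : current < level := by omega
    have h2 : ¬ current ≥ 10000000 := by omega
    rw [dif_pos h1, if_neg h2]
    rw [ih (current + 1) (xp * 2) (by omega) (by omega)]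
    ring

-- ===== VERDICT (by name: the statement is the Claim_ definition above) =====
theorem get_xp_for_level_spec : Claim_equal_get_xp_for_level := by
  intro level _ hpre
  unfold Spec_get_xp_for_level get_xp_for_level get_xp_for_level_alt
  have hnot : ¬ level > 10000000 := by exact not_lt.mpr hpre
  rw [if_neg hnot]
  rw [get_xp_for_level_loop_closed level hpre (level - 0).toNat 0 500 le_rfl rfl]
  by_cases h : level ≤ 0
  · have h0 : (level - 0).toNat = 0 := by omega
    rw [h0, if_pos h]; ring
  · have h0 : (level - 0).toNat = level.toNat := by omega
    rw [h0, if_neg h]
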